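-- pv_equiv track=rewrite | github.com/AaroneGeorge/Swarmy-Skillz | backend/market_reader.py | _fuzzy_filter
-- ===== SOURCE A (Python) =====
-- def _fuzzy_filter(markets: list[dict], query: str, key: str = "question") -> list[dict]:
--     """Filter markets by matching ANY word from the query (case-insensitive).
--
--     This is more permissive than exact substring matching — a query like
--     "Iran ceasefire" will match markets containing either "Iran" OR "ceasefire".
--     Results containing more query words are ranked first.
--     """
--     query_words = [w.lower() for w in query.split() if len(w) > 2]
--     if not query_words:
--         return markets
--
--     scored = []
--     for m in markets:
--         text = m.get(key, "").lower()
--         matches = sum(1 for w in query_words if w in text)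
--         if matches > 0:
--             scored.append((matches, m))
--
--     scored.sort(key=lambda x: x[0], reverse=True)
--     return [m for _, m in scored]
-- ===== SOURCE B (Python) =====
-- def _fuzzy_filter(markets: list[dict], query: str, key: str = "question") -> list[dict]:
--     """Counting/bucket sort over the integer score range instead of a comparison sort."""
--     query_words = [w.lower() for w in query.split() if len(w) > 2]
--     if not query_words:
--         return markets
--
--     buckets = [[] for _ in range(len(query_words) + 1)]
--     for m in markets:
--         text = m.get(key, "").lower()
--         matches = 0
--         for w in query_words:
--             if w in text:
--                 matches += 1
--         buckets[matches].append(m)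
--
--     out = []
--     for b in buckets[1:]:
--         out = b + out
--     return out
-- ===== Notes on version B (the rewrite author's own statement) =====
-- stated objective: alternative
-- what changed: B replaces A's collect-(score,market)-tuples-then-stable-reverse-comparison-sort with a counting/bucket sort: one pass drops each market into buckets[matches] (matches counted with an explicit accumulator loop, score-0 bucket discarded), and the result is assembled by prepending buckets[1..W] so higher scores come first.
import Mathlib
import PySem

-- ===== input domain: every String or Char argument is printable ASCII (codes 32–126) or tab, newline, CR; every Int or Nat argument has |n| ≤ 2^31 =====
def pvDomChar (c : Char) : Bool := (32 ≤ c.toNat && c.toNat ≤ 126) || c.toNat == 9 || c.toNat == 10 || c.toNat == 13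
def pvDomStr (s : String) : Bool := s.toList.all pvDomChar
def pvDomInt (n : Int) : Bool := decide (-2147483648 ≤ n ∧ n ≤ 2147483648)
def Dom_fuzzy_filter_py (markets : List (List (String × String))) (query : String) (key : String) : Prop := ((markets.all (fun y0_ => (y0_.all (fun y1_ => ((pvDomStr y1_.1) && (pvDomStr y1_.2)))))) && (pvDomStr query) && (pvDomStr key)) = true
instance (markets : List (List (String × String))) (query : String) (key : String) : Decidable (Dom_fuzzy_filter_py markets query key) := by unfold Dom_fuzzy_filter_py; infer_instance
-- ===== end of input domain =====

-- B replaces A's collect-score-tuples-then-stable-reverse-comparison-sort with a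
-- counting/bucket sort over the bounded integer score range: one pass drops each
-- market into buckets[matchN], and buckets 1..W are prepended high-scores-first
-- (objective: alternative, not claimed faster).

-- ===== PORT A =====
def fuzzy_filter_py (markets : List (List (String × String))) (query : String) (key : String) : List (List (String × String)) :=
  let query_words := ((PySem.Str.split₀ query).filter (fun w => 2 < PySem.Str.len w)).map PySem.Str.lower
  if query_words.isEmpty then markets
  else
    let scored : List (Int × List (String × String)) := markets.foldl (fun scored m =>
      let text := PySem.Str.lower (PySem.Dict.getD (PySem.Dict.ofList m) key "")
      let matchCount : Int := ((query_words.filter (fun w => PySem.Str.isIn w text)).map (fun _ => (1 : Int))).sum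
      if matchCount > 0 then scored ++ [(matchCount, m)] else scored) []
    (PySem.List.sorted scored (fun x => x.1) true).map (fun x => x.2)

-- ===== PORT B =====
def fuzzy_filter_py_alt (markets : List (List (String × String))) (query : String) (key : String) : List (List (String × String)) :=
  let query_words := ((PySem.Str.split₀ query).filter (fun w => 2 < PySem.Str.len w)).map PySem.Str.lower
  if query_words.isEmpty then markets
  else
    -- buckets = [[] for _ in range(len(query_words)+1)]
    let buckets0 : List (List (List (String × String))) := (List.range (query_words.length + 1)).map (fun _ => [])
    -- for m in markets: buckets[matchN].append(m)      (matchN counted with an accumulator loop; 0 ≤ matchN ≤ W, always in range)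
    let buckets := markets.foldl (fun bs m =>
      let text := PySem.Str.lower (PySem.Dict.getD (PySem.Dict.ofList m) key "")
      let matchN := query_words.foldl (fun acc w => if PySem.Str.isIn w text then acc + 1 else acc) 0
      bs.modify matchN (fun b => b ++ [m])) buckets0
    -- out = []; for b in buckets[1:]: out = b + out     (buckets[1:] is .drop 1: exact, the index is a nonnegative literal)
    (buckets.drop 1).foldl (fun out b => b ++ out) []

-- ===== PRECONDITION & SPEC =====
def Spec_fuzzy_filter_py (markets : List (List (String × String))) (query : String) (key : String) (out : List (List (String × String))) : Prop := out = fuzzy_filter_py_alt markets query key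
instance (markets : List (List (String × String))) (query : String) (key : String) (out : List (List (String × String))) : Decidable (Spec_fuzzy_filter_py markets query key out) := by unfold Spec_fuzzy_filter_py; infer_instance

-- ===== CLAIM (what is proved, stated in full; the proofs are below) =====
def Claim_equal_fuzzy_filter_py : Prop := ∀ (markets : List (List (String × String))) (query : String) (key : String), Dom_fuzzy_filter_py markets query key → Spec_fuzzy_filter_py markets query key (fuzzy_filter_py markets query key)

-- ===== LEMMAS AND PROOFS =====

-- the per-market score, shared vocabulary of the proofs
def pvScore (query_words : List String) (key : String) (m : List (String × String)) : Int :=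
  ((query_words.filter (fun w => PySem.Str.isIn w (PySem.Str.lower (PySem.Dict.getD (PySem.Dict.ofList m) key "")))).map (fun _ => (1 : Int))).sum

-- buckets by score, highest first: pvGrp score n P = [score=n] ++ [score=n-1] ++ … ++ [score=1]
def pvGrp {α : Type} (score : α → Int) : Nat → List α → List α
  | 0, _ => []
  | n + 1, P => P.filter (fun m => score m = ((n : Int) + 1)) ++ pvGrp score n P

theorem pvScore_eq_length (qw : List String) (key : String) (m : List (String × String)) :
    pvScore qw key m = (((qw.filter (fun w => PySem.Str.isIn w (PySem.Str.lower (PySem.Dict.getD (PySem.Dict.ofList m) key "")))).length : Int)) := by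
  simp [pvScore, List.map_const', List.sum_replicate]

theorem pvScore_le (qw : List String) (key : String) (m : List (String × String)) : pvScore qw key m ≤ (qw.length : Int) := by
  rw [pvScore_eq_length]
  exact_mod_cast List.length_filter_le _ _

theorem pvInsertBy_nil {α : Type} (before : α → α → Bool) (x : α) : PySem.List.insertBy before x [] = [x] := by
  simp [PySem.List.insertBy]

theorem pvInsertBy_cons_true {α : Type} (before : α → α → Bool) (x y : α) (ys : List α) (h : before x y = true) :
    PySem.List.insertBy before x (y :: ys) = x :: y :: ys := by
  simp [PySem.List.insertBy, h]

theorem pvInsertBy_cons_false {α : Type} (before : α → α → Bool) (x y : α) (ys : List α) (h : before x y = false) :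
    PySem.List.insertBy before x (y :: ys) = y :: PySem.List.insertBy before x ys := by
  simp [PySem.List.insertBy, h]

theorem pvInsertBy_append_left {α : Type} (before : α → α → Bool) (x : α) (ys1 ys2 : List α)
    (h : ∀ y ∈ ys1, before x y = false) :
    PySem.List.insertBy before x (ys1 ++ ys2) = ys1 ++ PySem.List.insertBy before x ys2 := by
  induction ys1 with
  | nil => simp
  | cons y t ih =>
    rw [List.cons_append, pvInsertBy_cons_false _ _ _ _ (h y (by simp)), ih (fun z hz => h z (by simp [hz]))]
    simp

theorem pvInsertBy_front {α : Type} (before : α → α → Bool) (x : α) (ys : List α)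
    (h : ∀ y ∈ ys, before x y = true) :
    PySem.List.insertBy before x ys = x :: ys := by
  cases ys with
  | nil => simp [pvInsertBy_nil]
  | cons y t => exact pvInsertBy_cons_true _ _ _ _ (h y (by simp))

theorem pvMem_grp {α : Type} (score : α → Int) (n : Nat) (P : List α) (y : α)
    (h : y ∈ pvGrp score n P) : 1 ≤ score y ∧ score y ≤ (n : Int) := by
  induction n with
  | zero => simp [pvGrp] at h
  | succ k ih =>
    rw [pvGrp, List.mem_append] at h
    rcases h with h | h
    · rcases List.mem_filter.1 h with ⟨_, hs⟩
      have hs' : score y = (k : Int) + 1 := by simpa using hs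
      constructor <;> [omega; simp [hs']]
    · rcases ih h with ⟨h1, h2⟩
      constructor
      · exact h1
      · push_cast; omega

theorem pvGrp_nil {α : Type} (score : α → Int) (n : Nat) : pvGrp score n [] = [] := by
  induction n with
  | zero => simp [pvGrp]
  | succ k ih => simp [pvGrp, ih]

theorem pvGrp_append_of_gt {α : Type} (score : α → Int) (n : Nat) (P : List α) (x : α)
    (h : (n : Int) < score x) : pvGrp score n (P ++ [x]) = pvGrp score n P := by
  induction n with
  | zero => simp [pvGrp]
  | succ k ih =>
    have hk : ((k : Nat) : Int) < score x := by push_cast at h ⊢; omega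
    rw [pvGrp, pvGrp, ih hk, List.filter_append]
    have : ([x].filter (fun m => score m = ((k : Int) + 1))) = [] := by
      simp; push_cast at h; omega
    rw [this, List.append_nil]

theorem pvInsertBy_grp {α : Type} (score : α → Int) (n : Nat) (P : List α) (x : α)
    (h1 : 1 ≤ score x) (h2 : score x ≤ (n : Int)) :
    PySem.List.insertBy (fun a b => decide (score b < score a)) x (pvGrp score n P)
      = pvGrp score n (P ++ [x]) := by
  induction n generalizing P with
  | zero => exact absurd (h1.trans h2) (by simp)
  | succ k ih =>
    rw [pvGrp, pvGrp, List.filter_append]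
    by_cases hx : score x = (k : Int) + 1
    · rw [pvInsertBy_append_left _ _ _ _ (by
        intro y hy
        rcases List.mem_filter.1 hy with ⟨_, hs⟩
        have : score y = (k : Int) + 1 := by simpa using hs
        simp [this, hx])]
      rw [pvInsertBy_front _ _ _ (by
        intro y hy
        have := pvMem_grp score k P y hy
        simp [hx]; omega)]
      have hgt : ((k : Nat) : Int) < score x := by omega
      rw [pvGrp_append_of_gt score k P x hgt]
      have : ([x].filter (fun m => score m = ((k : Int) + 1))) = [x] := by simp [hx]
      rw [this]
      simp
    · have hx' : score x ≤ (k : Int) := by push_cast at h2; omega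
      rw [pvInsertBy_append_left _ _ _ _ (by
        intro y hy
        rcases List.mem_filter.1 hy with ⟨_, hs⟩
        have : score y = (k : Int) + 1 := by simpa using hs
        simp [this]; omega)]
      rw [ih P hx']
      have : ([x].filter (fun m => score m = ((k : Int) + 1))) = [] := by simp [hx]
      rw [this, List.append_nil]

theorem pvFoldl_insertBy_grp {α : Type} (score : α → Int) (n : Nat) (L P : List α)
    (h : ∀ x ∈ L, 1 ≤ score x ∧ score x ≤ (n : Int)) :
    L.foldl (fun acc x => PySem.List.insertBy (fun a b => decide (score b < score a)) x acc)
      (pvGrp score n P) = pvGrp score n (P ++ L) := by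
  induction L generalizing P with
  | nil => simp
  | cons x t ih =>
    rcases h x (by simp) with ⟨h1, h2⟩
    rw [List.foldl_cons, pvInsertBy_grp score n P x h1 h2,
      ih (P ++ [x]) (fun z hz => h z (by simp [hz]))]
    simp

theorem pvSorted_eq_grp {α : Type} (score : α → Int) (n : Nat) (L : List α)
    (h : ∀ x ∈ L, 1 ≤ score x ∧ score x ≤ (n : Int)) :
    PySem.List.sorted L score true = pvGrp score n L := by
  rw [PySem.List.sorted_rev_eq_foldl_insertBy]
  have := pvFoldl_insertBy_grp score n L [] h
  rw [pvGrp_nil] at this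
  simpa using this

theorem pvGrp_map_snd {α : Type} (score : α → Int) (n : Nat) (ms : List α) :
    (pvGrp (fun p : Int × α => p.1) n (ms.map (fun m => (score m, m)))).map (fun p => p.2)
      = pvGrp score n ms := by
  induction n with
  | zero => simp [pvGrp]
  | succ k ih =>
    rw [pvGrp, pvGrp, List.map_append, ih, List.filter_map, List.map_map]
    simp [Function.comp_def]

theorem pvGrp_filter_pos {α : Type} (score : α → Int) (n : Nat) (ms : List α) :
    pvGrp score n (ms.filter (fun m => score m > 0)) = pvGrp score n ms := by
  induction n with
  | zero => simp [pvGrp]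
  | succ k ih =>
    rw [pvGrp, pvGrp, ih, List.filter_filter]
    congr 1
    apply List.filter_congr
    intro m _
    by_cases h : score m = (k : Int) + 1 <;> simp [h]

theorem pvFoldl_scored {α : Type} (score : α → Int) (ms : List α) (acc : List (Int × α)) :
    ms.foldl (fun sc m => if score m > 0 then sc ++ [(score m, m)] else sc) acc
      = acc ++ (ms.filter (fun m => score m > 0)).map (fun m => (score m, m)) := by
  induction ms generalizing acc with
  | nil => simp
  | cons m t ih =>
    rw [List.foldl_cons, List.filter_cons]
    by_cases h : score m > 0
    · simp only [h, if_pos, decide_true, ih]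
      simp
    · simp only [h, if_neg, not_false_iff, decide_false, ih]
      simp

theorem pvA_branch (markets : List (List (String × String))) (qw : List String) (key : String) :
    (PySem.List.sorted (markets.foldl (fun scored m =>
        let text := PySem.Str.lower (PySem.Dict.getD (PySem.Dict.ofList m) key "")
        let matchCount : Int := ((qw.filter (fun w => PySem.Str.isIn w text)).map (fun _ => (1 : Int))).sum
        if matchCount > 0 then scored ++ [(matchCount, m)] else scored) [])
      (fun x => x.1) true).map (fun x => x.2) = pvGrp (pvScore qw key) qw.length markets := by
  have hfold : markets.foldl (fun scored m =>
      let text := PySem.Str.lower (PySem.Dict.getD (PySem.Dict.ofList m) key "")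
      let matchCount : Int := ((qw.filter (fun w => PySem.Str.isIn w text)).map (fun _ => (1 : Int))).sum
      if matchCount > 0 then scored ++ [(matchCount, m)] else scored) []
      = (markets.filter (fun m => pvScore qw key m > 0)).map (fun m => (pvScore qw key m, m)) := by
    have := pvFoldl_scored (pvScore qw key) markets []
    simpa [pvScore] using this
  rw [hfold]
  have hbound : ∀ p ∈ (markets.filter (fun m => pvScore qw key m > 0)).map (fun m => (pvScore qw key m, m)),
      1 ≤ (p.1 : Int) ∧ p.1 ≤ (qw.length : Int) := by
    intro p hp
    rcases List.mem_map.1 hp with ⟨m, hm, rfl⟩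
    rcases List.mem_filter.1 hm with ⟨_, hpos⟩
    have hpos' : 0 < pvScore qw key m := by simpa using hpos
    exact ⟨by omega, pvScore_le qw key m⟩
  rw [pvSorted_eq_grp (fun p : Int × List (String × String) => p.1) qw.length _ hbound]
  rw [pvGrp_map_snd (pvScore qw key) qw.length]
  exact pvGrp_filter_pos (pvScore qw key) qw.length markets

-- ===== B-side lemmas (bucket sort) =====

-- the accumulator count loop is the filter length
theorem pvCountFoldl (qw : List String) (p : String → Bool) (a : Nat) :
    qw.foldl (fun acc w => if p w then acc + 1 else acc) a = a + (qw.filter p).length := by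
  induction qw generalizing a with
  | nil => simp
  | cons w t ih =>
    rw [List.foldl_cons, List.filter_cons]
    by_cases h : p w
    · simp [h, ih]; omega
    · simp [h, ih]

theorem pvModify_range_map {α : Type} (n j : Nat) (f : Nat → α) (g : α → α) :
    ((List.range n).map f).modify j g = (List.range n).map (fun i => if j = i then g (f i) else f i) := by
  apply List.ext_getElem
  · simp
  · intro k h1 h2
    simp [List.getElem_modify]

theorem pvBuckets_inv {α : Type} (sc : α → Nat) (n : Nat) (ms P : List α) :
    ms.foldl (fun bs m => bs.modify (sc m) (fun b => b ++ [m]))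
      ((List.range n).map (fun i => P.filter (fun m => sc m = i)))
      = (List.range n).map (fun i => (P ++ ms).filter (fun m => sc m = i)) := by
  induction ms generalizing P with
  | nil => simp
  | cons m t ih =>
    rw [List.foldl_cons, pvModify_range_map]
    have hstep : (List.range n).map (fun i => if sc m = i then P.filter (fun x => sc x = i) ++ [m] else P.filter (fun x => sc x = i))
        = (List.range n).map (fun i => (P ++ [m]).filter (fun x => sc x = i)) := by
      apply List.map_congr_left
      intro i _
      rw [List.filter_append]
      by_cases h : sc m = i
      · simp [h]
      · simp [h]
    rw [hstep, ih (P ++ [m])]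
    simp

theorem pvRangeFold {α : Type} (scN : α → Nat) (n : Nat) (ms : List α) :
    ((List.range' 1 n).map (fun i => ms.filter (fun m => scN m = i))).foldl
        (fun out b => b ++ out) []
      = pvGrp (fun m => ((scN m : Nat) : Int)) n ms := by
  induction n with
  | zero => simp [pvGrp]
  | succ k ih =>
    have hconc : List.range' 1 (k + 1) = List.range' 1 k ++ [1 + k] := by
      rw [List.range'_concat]; norm_num
    rw [hconc, List.map_append, List.foldl_append]
    simp only [List.map_cons, List.map_nil, List.foldl_cons, List.foldl_nil]
    rw [ih, pvGrp]
    congr 1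
    apply List.filter_congr
    intro m _
    by_cases h : scN m = 1 + k
    · simp [h]; omega
    · have : ¬ ((scN m : Int) = (k : Int) + 1) := by
        intro hc; apply h; omega
      simp [h, this]

theorem pvDropFold {α : Type} (scN : α → Nat) (n : Nat) (ms : List α) :
    (((List.range (n + 1)).map (fun i => ms.filter (fun m => scN m = i))).drop 1).foldl
        (fun out b => b ++ out) []
      = pvGrp (fun m => ((scN m : Nat) : Int)) n ms := by
  have hshape : ((List.range (n + 1)).map (fun i => ms.filter (fun m => scN m = i))).drop 1
      = (List.range' 1 n).map (fun i => ms.filter (fun m => scN m = i)) := by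
    rw [List.range_eq_range', List.range'_succ, List.map_cons, List.drop_one, List.tail_cons]
  rw [hshape, pvRangeFold]

theorem pvB_branch (markets : List (List (String × String))) (qw : List String) (key : String) :
    (((markets.foldl (fun bs m =>
        let text := PySem.Str.lower (PySem.Dict.getD (PySem.Dict.ofList m) key "")
        let matchN := qw.foldl (fun acc w => if PySem.Str.isIn w text then acc + 1 else acc) 0
        bs.modify matchN (fun b => b ++ [m]))
        ((List.range (qw.length + 1)).map (fun _ => []))).drop 1).foldl (fun out b => b ++ out) [])
      = pvGrp (pvScore qw key) qw.length markets := by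
  -- the Nat score of B
  set scN : List (String × String) → Nat := fun m =>
    (qw.filter (fun w => PySem.Str.isIn w (PySem.Str.lower (PySem.Dict.getD (PySem.Dict.ofList m) key "")))).length with hscN
  have hcount : ∀ m, (qw.foldl (fun acc w => if PySem.Str.isIn w (PySem.Str.lower (PySem.Dict.getD (PySem.Dict.ofList m) key "")) then acc + 1 else acc) 0) = scN m := by
    intro m
    rw [pvCountFoldl]
    simp [hscN]
  have hfold : markets.foldl (fun bs m =>
      let text := PySem.Str.lower (PySem.Dict.getD (PySem.Dict.ofList m) key "")
      let matchN := qw.foldl (fun acc w => if PySem.Str.isIn w text then acc + 1 else acc) 0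
      bs.modify matchN (fun b => b ++ [m]))
      ((List.range (qw.length + 1)).map (fun _ => []))
      = (List.range (qw.length + 1)).map (fun i => markets.filter (fun m => scN m = i)) := by
    have hinit : ((List.range (qw.length + 1)).map (fun _ => ([] : List (List (String × String)))))
        = (List.range (qw.length + 1)).map (fun i => ([] : List (List (String × String))).filter (fun m => scN m = i)) := by
      simp
    simp only [hcount]
    rw [hinit]
    have h0 := pvBuckets_inv scN (qw.length + 1) markets []
    simpa using h0
  rw [hfold, pvDropFold scN qw.length markets]
  have hfun : (fun m => ((scN m : Nat) : Int)) = pvScore qw key := by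
    funext m
    rw [pvScore_eq_length]
  rw [hfun]

-- ===== VERDICT (by name: the statement is the Claim_ definition above) =====
theorem fuzzy_filter_py_spec : Claim_equal_fuzzy_filter_py := by
  intro markets query key _
  unfold Spec_fuzzy_filter_py fuzzy_filter_py fuzzy_filter_py_alt
  by_cases hemp : (((PySem.Str.split₀ query).filter (fun w => 2 < PySem.Str.len w)).map PySem.Str.lower).isEmpty
  · simp only [hemp, if_pos]
  · simp only [hemp, if_neg, Bool.not_eq_true]
    rw [pvA_branch markets _ key, pvB_branch markets _ key]
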